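-- pv_equiv track=rewrite | github.com/justgameartik/Data-cross-with-gcn | main.py | findNearestIdx
-- ===== SOURCE A (Python) =====
-- def findNearestIdx(time, grb_time):
--   left = 0; right = len(time) - 1
--   while left < right:
--       medium = (left+right) // 2
--       if time[medium] > grb_time:
--           right = medium
--       else:
--           left = medium+1
--   return right
-- ===== SOURCE B (Python) =====
-- def findNearestIdx(time, grb_time):
--     if not time:
--         return -1
--     for i, t in enumerate(time):
--         if t > grb_time:
--             return i
--     return len(time) - 1
-- ===== Notes on version B (the rewrite author's own statement) =====
-- stated objective: simpler
-- what changed: Replaces the halving binary-search loop over (left, right) with a single left-to-right scan returning the first index whose value exceeds grb_time (len-1 if none, -1 on empty); equivalent whenever the comparison pattern against grb_time is monotone, the natural domain of a binary search.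
-- outside the precondition, e.g. on findNearestIdx([5, 0, 0], 3): A returns 2, B returns 0
import Mathlib
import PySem

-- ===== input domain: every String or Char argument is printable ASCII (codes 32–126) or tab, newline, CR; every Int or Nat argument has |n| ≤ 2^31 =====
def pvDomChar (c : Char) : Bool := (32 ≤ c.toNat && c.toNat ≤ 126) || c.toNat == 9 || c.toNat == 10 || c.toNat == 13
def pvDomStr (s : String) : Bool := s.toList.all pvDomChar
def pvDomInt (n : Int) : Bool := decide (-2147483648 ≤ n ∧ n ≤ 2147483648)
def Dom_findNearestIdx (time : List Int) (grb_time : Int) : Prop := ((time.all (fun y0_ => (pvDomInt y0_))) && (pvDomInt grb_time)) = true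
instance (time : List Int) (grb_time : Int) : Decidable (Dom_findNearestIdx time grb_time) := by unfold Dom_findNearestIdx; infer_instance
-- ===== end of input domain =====

-- B replaces the binary search by a single forward scan (simpler); equivalence is proved
-- whenever the comparison pattern against grb_time is monotone (Pre_), the natural domain
-- of a binary search (it includes every sorted list).

-- ===== PORT A =====
-- while left < right: medium = (left+right)//2; branch; return right
def findNearestIdxGoA (time : List Int) (grb_time : Int) (left right : Int) : Int :=
  if _h : left < right then
    let medium := PySem.Int.floordiv (left + right) 2
    -- time[medium] is always in range on reached states; pyGetD is exact here
    if PySem.List.pyGetD time medium 0 > grb_time then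
      findNearestIdxGoA time grb_time left medium
    else
      findNearestIdxGoA time grb_time (medium + 1) right
  else right
termination_by (right - left).toNat
decreasing_by
  · have h2 : PySem.Int.floordiv (left + right) 2 < right := by
      rw [PySem.Int.floordiv_lt_iff_lt_mul (by omega)]; omega
    omega
  · have h1 := PySem.Int.floordiv_two_mid_bounds (le_of_lt _h)
    omega

def findNearestIdx (time : List Int) (grb_time : Int) : Int :=
  findNearestIdxGoA time grb_time 0 ((time.length : Int) - 1)

-- ===== PORT B =====
-- forward scan: first index with t > grb_time; len-1 if none
def findNearestIdxGoB (grb_time : Int) (i : Nat) : List Int → Int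
  | [] => (i : Int) - 1
  | t :: rest => if t > grb_time then (i : Int) else findNearestIdxGoB grb_time (i + 1) rest

def findNearestIdx_alt (time : List Int) (grb_time : Int) : Int :=
  if time.isEmpty then -1 else findNearestIdxGoB grb_time 0 time

-- ===== PRECONDITION & SPEC =====
-- Pre_ excludes inputs whose comparison pattern against grb_time is not monotone (some element
-- > grb_time followed by one ≤ it): there A's binary-search answer is an accident of its probe
-- sequence.  It admits every sorted list and every list lying entirely on one side of grb_time.
def Pre_findNearestIdx (time : List Int) (grb_time : Int) : Prop :=
  ∀ (i : Nat), ∀ (hi : i < time.length), ∀ (j : Nat), ∀ (hj : j < time.length), i ≤ j →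
    grb_time < time[i] → grb_time < time[j]
instance (time : List Int) (grb_time : Int) : Decidable (Pre_findNearestIdx time grb_time) := by
  unfold Pre_findNearestIdx; infer_instance

def pvWitness_findNearestIdx : List Int × Int := ([1, 3, 3, 7], 3)

def Spec_findNearestIdx (time : List Int) (grb_time : Int) (out : Int) : Prop := out = findNearestIdx_alt time grb_time
instance (time : List Int) (grb_time : Int) (out : Int) : Decidable (Spec_findNearestIdx time grb_time out) := by unfold Spec_findNearestIdx; infer_instance

-- ===== CLAIM (what is proved, stated in full; the proofs are below) =====
def Claim_equal_findNearestIdx : Prop := ∀ (time : List Int) (grb_time : Int), Dom_findNearestIdx time grb_time → Pre_findNearestIdx time grb_time → Spec_findNearestIdx time grb_time (findNearestIdx time grb_time)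

-- ===== LEMMAS AND PROOFS =====

-- B's scan computes findIdx (first index with value > grb_time), clamped at length - 1.
theorem goB_eq (grb_time : Int) : ∀ (l : List Int) (i : Nat),
    findNearestIdxGoB grb_time i l =
      if l.findIdx (fun t => grb_time < t) < l.length
      then ((i + l.findIdx (fun t => grb_time < t) : Nat) : Int)
      else (i : Int) + (l.length : Int) - 1 := by
  intro l
  induction l with
  | nil => intro i; simp [findNearestIdxGoB]
  | cons t rest ih =>
    intro i
    by_cases ht : grb_time < t
    · simp [findNearestIdxGoB, List.findIdx_cons, ht]
    · simp only [findNearestIdxGoB, if_neg (by omega : ¬ t > grb_time), ih,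
        List.findIdx_cons, List.length_cons]
      have : (decide (grb_time < t)) = false := by simp [ht]
      rw [this]
      simp only [cond_false]
      split_ifs with h1 h2 h2 <;> push_cast <;> omega

-- A's binary search converges to any F trapped by the loop invariant.
theorem goA_inv (time : List Int) (grb_time : Int) (F : Int)
    (hstep : ∀ m : Int, 0 ≤ m → m < (time.length : Int) →
      (PySem.List.pyGetD time m 0 > grb_time → F ≤ m) ∧
      (m < (time.length : Int) - 1 → ¬ PySem.List.pyGetD time m 0 > grb_time → m + 1 ≤ F)) :
    ∀ (n : Nat) (l r : Int), (r - l).toNat ≤ n → 0 ≤ l → l ≤ F → F ≤ r →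
      r ≤ (time.length : Int) - 1 →
      findNearestIdxGoA time grb_time l r = F := by
  intro n
  induction n with
  | zero =>
    intro l r hn h0 hlF hFr hr
    have : ¬ l < r := by omega
    rw [findNearestIdxGoA, dif_neg this]; omega
  | succ k ih =>
    intro l r hn h0 hlF hFr hr
    by_cases hlr : l < r
    · have hmid := PySem.Int.floordiv_two_mid_bounds (le_of_lt hlr)
      have hmlt : PySem.Int.floordiv (l + r) 2 < r := by
        rw [PySem.Int.floordiv_lt_iff_lt_mul (by omega)]; omega
      set m := PySem.Int.floordiv (l + r) 2 with hm
      have hs := hstep m (by omega) (by omega)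
      rw [findNearestIdxGoA, dif_pos hlr]
      by_cases hc : PySem.List.pyGetD time m 0 > grb_time
      · simp only [← hm, if_pos hc]
        exact ih l m (by omega) h0 hlF (hs.1 hc) (by omega)
      · simp only [← hm, if_neg hc]
        exact ih (m + 1) r (by omega) (by omega) (hs.2 (by omega) hc) hFr hr
    · rw [findNearestIdxGoA, dif_neg hlr]; omega

-- ===== VERDICT (by name: the statement is the Claim_ definition above) =====
theorem findNearestIdx_spec : Claim_equal_findNearestIdx := by
  intro time grb_time _hdom hpre
  unfold Spec_findNearestIdx findNearestIdx findNearestIdx_alt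
  cases time with
  | nil => rw [findNearestIdxGoA]; norm_num
  | cons a as =>
    set time := a :: as with htime
    have hne : time.isEmpty = false := by simp [htime]
    rw [hne]
    simp only [Bool.false_eq_true, if_false]
    set f := time.findIdx (fun t => grb_time < t) with hf
    have hflen : f ≤ time.length := List.findIdx_le_length
    have hlen : 1 ≤ time.length := by simp [htime]
    -- the trapped value F
    set F : Int := min (f : Int) ((time.length : Int) - 1) with hF
    have hstep : ∀ m : Int, 0 ≤ m → m < (time.length : Int) →
        (PySem.List.pyGetD time m 0 > grb_time → F ≤ m) ∧
        (m < (time.length : Int) - 1 → ¬ PySem.List.pyGetD time m 0 > grb_time → m + 1 ≤ F) := by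
      intro m hm0 hmlen
      have hmn : m.toNat < time.length := by omega
      have hget : PySem.List.pyGetD time m 0 = time[m.toNat] :=
        PySem.List.pyGetD_eq_getElem time 0 hm0 (by omega)
      constructor
      · intro hc
        -- F ≤ f ≤ m since p holds at m
        have hfle : f ≤ m.toNat := by
          by_contra hlt
          have := List.not_of_lt_findIdx (p := fun t => grb_time < t)
            (xs := time) (i := m.toNat) (by omega)
          rw [hget] at hc
          simp at this; omega
        omega
      · intro hmr hc
        rw [hget] at hc
        -- all j ≤ m fail p  (sortedness), hence f > m
        have hfgt : m.toNat < f := by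
          by_contra hle
          have hflt : f < time.length := by omega
          have hp : grb_time < time[f] := by
            have := List.findIdx_getElem (p := fun t => grb_time < t)
              (xs := time) (w := hflt)
            simpa using this
          exact absurd (hpre f hflt m.toNat hmn (by omega) hp) hc
        exact hF ▸ le_min (by omega) (by omega)
    have main := goA_inv time grb_time F hstep ((time.length : Int) - 0).toNat
      0 ((time.length : Int) - 1) (by omega) (by omega) (by omega) (by omega) (by omega)
    rw [main]
    rw [goB_eq]
    rw [← hf]
    split_ifs with h1 <;> push_cast <;> omega
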